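-- pv_equiv track=rewrite | github.com/GoldV2/ait-classes | a7-8-apcsp/Problem Sets/U3_M4_PS10_RAlmeida.py | mystery_decoder
-- ===== SOURCE A (Python) =====
-- replaces = {'a': '@', 'e': '#', 'i': '%', 'o': '*'}
--
-- def mystery_decoder(string):
--     decoded_message = ''
--     # iterating over every character in the string
--     for char in string:
--         # if that character is one of the values in the dictionary
--         if char in replaces.values():
--             # loop through every key in the dictionary
--             for letter in replaces:
--                 # if a key matches the current character
--                 if replaces[letter] == char:
--                     # add that character to the decoded message
--                     decoded_message += letter
--                     # break the foor loop because there is no reason to continue searching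
--                     break
--             # continue to next iteration after finding a valid letter
--             continue
--
--         decoded_message += char
--
--     return decoded_message
-- ===== SOURCE B (Python) =====
-- def mystery_decoder(string):
--     # Staged whole-string passes: one str.replace per symbol.
--     # Correct because the symbols ('@','#','%','*') and the letters
--     # ('a','e','i','o') are disjoint sets, so the passes are independent.
--     for sym, letter in (('@', 'a'), ('#', 'e'), ('%', 'i'), ('*', 'o')):
--         string = string.replace(sym, letter)
--     return string
-- ===== Notes on version B (the rewrite author's own statement) =====
-- stated objective: alternative
-- what changed: Replaced A's single per-character loop with an inner scan over the dict's keys by four staged whole-string str.replace passes (one per symbol), correct because the symbol and letter sets are disjoint.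
import Mathlib
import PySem

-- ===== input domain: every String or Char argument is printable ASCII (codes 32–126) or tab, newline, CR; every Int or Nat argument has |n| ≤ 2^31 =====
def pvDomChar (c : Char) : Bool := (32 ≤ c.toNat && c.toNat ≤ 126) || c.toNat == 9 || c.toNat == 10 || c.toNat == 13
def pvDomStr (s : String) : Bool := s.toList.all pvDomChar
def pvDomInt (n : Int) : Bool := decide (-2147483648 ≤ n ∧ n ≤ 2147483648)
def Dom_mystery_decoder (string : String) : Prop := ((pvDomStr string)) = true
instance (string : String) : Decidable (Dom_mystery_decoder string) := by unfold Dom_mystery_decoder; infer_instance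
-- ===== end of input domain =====

-- B replaces A's per-character loop (with inner key scan) by four staged whole-string replace passes, one per symbol; same values.

-- ===== PORT A =====
-- module-level dict replaces = {'a': '@', 'e': '#', 'i': '%', 'o': '*'}
def pvReplaces : PySem.Dict Char Char :=
  PySem.Dict.ofList [('a', '@'), ('e', '#'), ('i', '%'), ('o', '*')]

-- body of A's outer for-loop: the membership test, the inner key loop with break, and the fallthrough append
def mdStepA (acc : String) (c : Char) : String :=
  if (pvReplaces.values).contains c then
    match (pvReplaces.keys).find? (fun letter => pvReplaces.getD letter ' ' == c) with
    | some letter => acc.push letter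
    | none => acc
  else acc.push c

def mystery_decoder (string : String) : String :=
  string.toList.foldl mdStepA ""

-- ===== PORT B =====
-- the fixed (symbol, letter) pass list of Source B
def pvPasses : List (Char × Char) := [('@', 'a'), ('#', 'e'), ('%', 'i'), ('*', 'o')]

-- Source B's loop: one whole-string replace pass per (symbol, letter) pair
def mystery_decoder_alt (string : String) : String :=
  pvPasses.foldl (fun s p => PySem.Str.replace s (String.ofList [p.1]) (String.ofList [p.2])) string

-- ===== PRECONDITION & SPEC =====
def Spec_mystery_decoder (string : String) (out : String) : Prop := out = mystery_decoder_alt string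
instance (string : String) (out : String) : Decidable (Spec_mystery_decoder string out) := by unfold Spec_mystery_decoder; infer_instance

-- ===== CLAIM (what is proved, stated in full; the proofs are below) =====
def Claim_equal_mystery_decoder : Prop := ∀ (string : String), Dom_mystery_decoder string → Spec_mystery_decoder string (mystery_decoder string)

-- ===== LEMMAS AND PROOFS =====
-- the common characterisation: the pointwise decode map
def pvG (c : Char) : Char :=
  if c = '@' then 'a' else if c = '#' then 'e' else if c = '%' then 'i'
  else if c = '*' then 'o' else c

theorem mdStepA_eq (acc : String) (c : Char) :
    mdStepA acc c = acc.push (pvG c) := by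
  have hlit : ∀ c' : Char, c' = '@' ∨ c' = '#' ∨ c' = '%' ∨ c' = '*' →
      mdStepA acc c' = acc.push (pvG c') := by
    intro c' h
    have hv : pvReplaces.values.contains c' = true := by
      rcases h with h | h | h | h <;> subst h <;> decide
    have hf : (pvReplaces.keys).find? (fun letter => pvReplaces.getD letter ' ' == c')
        = some (pvG c') := by
      rcases h with h | h | h | h <;> subst h <;> decide
    simp only [mdStepA, hv, hf]; rfl
  by_cases h1 : c = '@'
  · exact hlit c (Or.inl h1)
  by_cases h2 : c = '#'
  · exact hlit c (Or.inr (Or.inl h2))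
  by_cases h3 : c = '%'
  · exact hlit c (Or.inr (Or.inr (Or.inl h3)))
  by_cases h4 : c = '*'
  · exact hlit c (Or.inr (Or.inr (Or.inr h4)))
  have hv : pvReplaces.values.contains c = false := by
    have : pvReplaces.values = ['@', '#', '%', '*'] := by decide
    simp [this, h1, h2, h3, h4]
  simp only [mdStepA, hv, Bool.false_eq_true, if_false, pvG, h1, h2, h3, h4]

theorem foldl_mdStepA (l : List Char) (acc : String) :
    l.foldl mdStepA acc = acc ++ String.ofList (l.map pvG) := by
  induction l generalizing acc with
  | nil => simp
  | cons c l ih =>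
      simp only [List.foldl_cons, List.map_cons, ih, mdStepA_eq]
      apply String.toList_injective
      simp

-- single-char replace is the pointwise substitution map
theorem replace_go_single (o n : Char) : ∀ (fuel : Nat) (l acc : List Char), l.length ≤ fuel →
    PySem.Chars.replace.go [o] [n] fuel l acc
      = acc.reverse ++ l.map (fun c => if c = o then n else c) := by
  intro fuel
  induction fuel with
  | zero =>
      intro l acc h
      have : l = [] := List.eq_nil_of_length_eq_zero (Nat.le_zero.mp h)
      subst this; simp [PySem.Chars.replace.go]
  | succ fuel ih =>
      intro l acc h
      cases l with
      | nil => simp [PySem.Chars.replace.go]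
      | cons c t =>
          by_cases hc : c = o
          · subst hc
            have hpre : [c].isPrefixOf (c :: t) = true := by
              simp [List.isPrefixOf]
            simp only [PySem.Chars.replace.go, hpre, if_true, List.length_cons,
              List.length_nil, List.drop_succ_cons, List.drop_zero, List.reverse_cons,
              List.reverse_nil, List.nil_append, List.singleton_append]
            rw [ih t (n :: acc) (by simpa using Nat.le_of_succ_le_succ h)]
            simp
          · have hpre : [o].isPrefixOf (c :: t) = false := by
              simp [List.isPrefixOf, Ne.symm hc]
            simp only [PySem.Chars.replace.go, hpre, Bool.false_eq_true, if_false]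
            rw [ih t (c :: acc) (by simpa using Nat.le_of_succ_le_succ h)]
            simp [hc]

theorem replace_single (s : String) (o n : Char) :
    (PySem.Str.replace s (String.ofList [o]) (String.ofList [n])).toList
      = s.toList.map (fun c => if c = o then n else c) := by
  rw [PySem.Str.toList_replace]
  have hto : (String.ofList [o]).toList = [o] := by simp
  have htn : (String.ofList [n]).toList = [n] := by simp
  rw [hto, htn, PySem.Chars.replace]
  simp only [List.isEmpty_cons, Bool.false_eq_true, if_false]
  rw [replace_go_single o n s.toList.length s.toList [] (le_refl _)]
  simp

theorem pvG_compose (c : Char) :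
    (if (if (if (if c = '@' then 'a' else c) = '#' then 'e'
         else (if c = '@' then 'a' else c)) = '%' then 'i'
       else (if (if c = '@' then 'a' else c) = '#' then 'e'
         else (if c = '@' then 'a' else c))) = '*' then 'o'
     else (if (if (if c = '@' then 'a' else c) = '#' then 'e'
         else (if c = '@' then 'a' else c)) = '%' then 'i'
       else (if (if c = '@' then 'a' else c) = '#' then 'e'
         else (if c = '@' then 'a' else c)))) = pvG c := by
  by_cases h1 : c = '@' <;> by_cases h2 : c = '#' <;> by_cases h3 : c = '%' <;>
    by_cases h4 : c = '*' <;> simp [pvG, h1, h2, h3, h4]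

theorem alt_eq_map (s : String) :
    mystery_decoder_alt s = String.ofList (s.toList.map pvG) := by
  apply String.toList_injective
  simp only [mystery_decoder_alt, pvPasses, List.foldl_cons, List.foldl_nil]
  rw [replace_single, replace_single, replace_single, replace_single]
  simp only [List.map_map]
  have : (String.ofList (List.map pvG s.toList)).toList = List.map pvG s.toList := by simp
  rw [this]
  apply List.map_congr_left
  intro c _
  exact pvG_compose c

-- ===== VERDICT (by name: the statement is the Claim_ definition above) =====
theorem mystery_decoder_spec : Claim_equal_mystery_decoder := by
  intro s _
  show _ = _
  rw [mystery_decoder, foldl_mdStepA, alt_eq_map]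
  apply String.toList_injective
  simp
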